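-- pv_equiv track=rewrite | github.com/ostew5/mart-rest | backend/app_v1/routers/index_resume/start.py | _mark_newlines
-- ===== SOURCE A (Python) =====
-- def _mark_newlines(text: str) -> str:
--     if not text:
--         return ""
--
--     result = []
--     last_nl_pos = -1
--     for i, ch in enumerate(text):
--         if ch == "\n":
--             next_is_newline = (i + 1 < len(text) and text[i + 1] == "\n")
--             dist = i - last_nl_pos - 1
--             if dist >= 10 and not next_is_newline:
--                 result.append("|")
--                 last_nl_pos = i
--                 continue
--             else:
--                 result.append("\n")
--                 last_nl_pos = i
--         else:
--             result.append(ch)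
--     return "".join(result)
-- ===== SOURCE B (Python) =====
-- def _mark_newlines(text: str) -> str:
--     parts = text.split("\n")
--     out = [parts[0]]
--     for prev, cur in zip(parts, parts[1:]):
--         sep = "|" if len(prev) >= 10 and cur else "\n"
--         out.append(sep + cur)
--     return "".join(out)
-- ===== Notes on version B (the rewrite author's own statement) =====
-- stated objective: simpler
-- what changed: A scans the text one character at a time, tracking the index of the last newline and peeking at the next character; B splits the text on newlines once and rejoins the parts in a single loop, choosing each separator (pipe or newline) from the preceding part's length and the following part's emptiness.
-- intended difference: On texts ending in a newline whose final line has at least 10 characters, A turns that trailing newline into a pipe (there is no next character, so its blank-line lookahead never fires), leaving a dangling pipe with nothing after it; B keeps the trailing newline, the intended value since the pipe is meant to join two nonempty lines. — e.g. on _mark_newlines("abcdefghij\n"): A returns "abcdefghij|", B returns "abcdefghij\n"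
import Mathlib
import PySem

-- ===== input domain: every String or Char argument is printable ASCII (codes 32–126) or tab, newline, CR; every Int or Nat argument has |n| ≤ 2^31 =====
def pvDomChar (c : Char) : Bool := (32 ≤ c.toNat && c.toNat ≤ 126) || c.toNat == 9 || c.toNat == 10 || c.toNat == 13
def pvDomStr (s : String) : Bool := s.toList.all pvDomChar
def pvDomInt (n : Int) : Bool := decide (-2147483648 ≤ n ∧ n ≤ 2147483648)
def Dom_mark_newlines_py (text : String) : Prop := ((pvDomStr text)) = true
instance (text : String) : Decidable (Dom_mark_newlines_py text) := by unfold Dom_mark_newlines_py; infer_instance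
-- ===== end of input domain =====

-- B replaces A's character-by-character scan (tracking the last-newline index) by a split-on-newline
-- followed by a join with computed separators (objective: simpler; a timing run also measured it
-- faster, the per-character work moving into str.split/join); on texts ending in a newline preceded
-- by a line of >= 10 characters the two differ, see D_mark_newlines_py below.


-- ===== PORT A =====
-- literal port: "for i, ch in enumerate(text)" becomes a foldl over PySem.List.enumerate;
-- state = (result chars, last_nl_pos); "".join(result) becomes String.ofList
def mark_newlines_py (text : String) : String :=
  if text.toList = [] then "" else
  String.ofList
    ((PySem.List.enumerate text.toList 0).foldl
      (fun (st : List Char × Int) (p : Int × Char) =>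
        if p.2 = '\n' then
          let next_is_newline : Prop :=
            p.1 + 1 < PySem.Str.len text ∧ PySem.Str.pyGet? text (p.1 + 1) = some '\n'
          let dist := p.1 - st.2 - 1
          if 10 ≤ dist ∧ ¬ next_is_newline then (st.1 ++ ['|'], p.1)
          else (st.1 ++ ['\n'], p.1)
        else (st.1 ++ [p.2], st.2))
      ([], -1)).1

-- ===== PORT B =====
-- Source B: parts = text.split('\n'); out starts with parts[0]; one loop over zip(parts, parts[1:])
-- appending sep + cur, with sep a pipe iff len(prev) >= 10 and cur is nonempty; ''.join(out)
def mark_newlines_py_alt (text : String) : String :=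
  let parts := PySem.Chars.splitOn text.toList ['\n']
  String.ofList
    ((parts.zip (parts.drop 1)).foldl
      (fun (acc : List Char) (pr : List Char × List Char) =>
        acc ++ (if 10 ≤ pr.1.length ∧ pr.2 ≠ [] then '|' else '\n') :: pr.2)
      (parts.headD []))

-- ===== PRECONDITION & SPEC =====
-- On texts ending in a newline whose final line has >= 10 characters, A turns that trailing
-- newline into a pipe (there is no next character, so its blank-line lookahead never fires),
-- leaving a dangling pipe with nothing after it; B keeps the trailing newline, which is the
-- intended value since the pipe is meant to join two nonempty lines.
def D_mark_newlines_py (text : String) : Prop :=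
  text.toList.getLast? = some '\n' ∧
  10 ≤ (text.toList.dropLast.reverse.takeWhile (fun c => c != '\n')).length
instance (text : String) : Decidable (D_mark_newlines_py text) := by unfold D_mark_newlines_py; infer_instance

def Spec_mark_newlines_py (text : String) (out : String) : Prop :=
  ¬ D_mark_newlines_py text → out = mark_newlines_py_alt text
instance (text : String) (out : String) : Decidable (Spec_mark_newlines_py text out) := by unfold Spec_mark_newlines_py; infer_instance

def pvDiffWitness_mark_newlines_py : String := "abcdefghij\n"
def pvDiffWitnessOut_mark_newlines_py : String × String := ("abcdefghij|", "abcdefghij\n")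

-- ===== CLAIM (what is proved, stated in full; the proofs are below) =====
def Claim_unchanged_mark_newlines_py : Prop := ∀ (text : String), Dom_mark_newlines_py text → Spec_mark_newlines_py text (mark_newlines_py text)
def Claim_changed_mark_newlines_py : Prop := Dom_mark_newlines_py (pvDiffWitness_mark_newlines_py) ∧ D_mark_newlines_py (pvDiffWitness_mark_newlines_py) ∧ mark_newlines_py (pvDiffWitness_mark_newlines_py) = pvDiffWitnessOut_mark_newlines_py.1 ∧ mark_newlines_py_alt (pvDiffWitness_mark_newlines_py) = pvDiffWitnessOut_mark_newlines_py.2 ∧ pvDiffWitnessOut_mark_newlines_py.1 ≠ pvDiffWitnessOut_mark_newlines_py.2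
def Claim_exact_mark_newlines_py : Prop := ∀ (text : String), Dom_mark_newlines_py text → D_mark_newlines_py text → mark_newlines_py text ≠ mark_newlines_py_alt text

-- ===== LEMMAS AND PROOFS =====

-- reference recursion for A: pvGo cs d = A's marked form of cs, d characters since the last newline
def pvGo : List Char → Nat → List Char
  | [], _ => []
  | c :: rest, d =>
      if c = '\n' then
        (if 10 ≤ d ∧ rest.head? ≠ some '\n' then '|' else '\n') :: pvGo rest 0
      else c :: pvGo rest (d + 1)

-- reference recursion for B: at a newline B additionally requires a nonempty following segment
def pvGoB : List Char → Nat → List Char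
  | [], _ => []
  | c :: rest, d =>
      if c = '\n' then
        (if 10 ≤ d ∧ rest.head? ≠ some '\n' ∧ rest ≠ [] then '|' else '\n') :: pvGoB rest 0
      else c :: pvGoB rest (d + 1)

-- the exact set where the two recursions disagree: a final newline preceded by ≥ 10 characters
def pvBad : List Char → Nat → Bool
  | [], _ => false
  | c :: rest, d =>
      if c = '\n' then (if rest = [] then decide (10 ≤ d) else pvBad rest 0)
      else pvBad rest (d + 1)

-- A's loop body, named so that the step of the fold can be rewritten (defeq to the lambda in the port)
def pvStepA (text : String) (st : List Char × Int) (p : Int × Char) : List Char × Int :=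
  if p.2 = '\n' then
    let next_is_newline : Prop :=
      p.1 + 1 < PySem.Str.len text ∧ PySem.Str.pyGet? text (p.1 + 1) = some '\n'
    let dist := p.1 - st.2 - 1
    if 10 ≤ dist ∧ ¬ next_is_newline then (st.1 ++ ['|'], p.1)
    else (st.1 ++ ['\n'], p.1)
  else (st.1 ++ [p.2], st.2)

lemma pvStepA_nl (text : String) (st : List Char × Int) (i : Int) :
    pvStepA text st (i, '\n') =
      if 10 ≤ i - st.2 - 1 ∧
          ¬ (i + 1 < PySem.Str.len text ∧ PySem.Str.pyGet? text (i + 1) = some '\n')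
      then (st.1 ++ ['|'], i) else (st.1 ++ ['\n'], i) := rfl

lemma pvStepA_ch (text : String) (st : List Char × Int) (i : Int) (c : Char) (hc : c ≠ '\n') :
    pvStepA text st (i, c) = (st.1 ++ [c], st.2) := by
  simp [pvStepA, hc]

lemma pv_A_loop (text : String) : ∀ (suf pre acc : List Char) (d : Nat),
    text.toList = pre ++ suf →
    ((PySem.List.enumerate suf ((pre.length : Int))).foldl (pvStepA text)
      (acc, (pre.length : Int) - 1 - (d : Int))).1 = acc ++ pvGo suf d := by
  intro suf
  induction suf with
  | nil => intro pre acc d _; simp [PySem.List.enumerate, pvGo]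
  | cons c rest ih =>
    intro pre acc d h
    rw [PySem.List.enumerate_cons, List.foldl_cons]
    by_cases hc : c = '\n'
    · subst hc
      rw [pvStepA_nl]
      have hnext : ((pre.length : Int) + 1 < PySem.Str.len text ∧
          PySem.Str.pyGet? text ((pre.length : Int) + 1) = some '\n') ↔ rest.head? = some '\n' := by
        have hlen : PySem.Str.len text = ((pre.length + 1 + rest.length : Nat) : Int) := by
          rw [PySem.Str.len_eq, h]; simp; omega
        have hget : PySem.Str.pyGet? text ((pre.length : Int) + 1) = rest.head? := by
          rw [show ((pre.length : Int) + 1) = ((pre.length + 1 : Nat) : Int) by push_cast; ring]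
          simp only [PySem.Str.pyGet?_eq, PySem.Chars.pyGet?_eq_listPyGet?,
            PySem.List.pyGet?_natCast]
          rw [h, List.getElem?_append_right (by omega)]
          simp [List.head?_eq_getElem?]
        rw [hlen, hget]
        constructor
        · exact fun hx => hx.2
        · intro h2
          refine ⟨?_, h2⟩
          cases rest with
          | nil => simp at h2
          | cons a r => push_cast [List.length_cons]; omega
      have hd : ((pre.length : Int)) - ((pre.length : Int) - 1 - (d : Int)) - 1 = (d : Int) := by
        ring
      by_cases hcond : 10 ≤ d ∧ rest.head? ≠ some '\n'
      · rw [if_pos (by rw [hd]; exact ⟨by exact_mod_cast hcond.1, fun hx => hcond.2 (hnext.mp hx)⟩)]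
        rw [show acc ++ pvGo ('\n'::rest) d = (acc ++ ['|']) ++ pvGo rest 0 by
          simp [pvGo, hcond]]
        have hih := ih (pre ++ ['\n']) (acc ++ ['|']) 0 (by simp [h])
        simp only [List.length_append, List.length_cons, List.length_nil] at hih
        convert hih using 3
        refine Prod.ext (by simp) (by push_cast; ring)
      · have hneg : ¬ (10 ≤ (pre.length : Int) - ((pre.length : Int) - 1 - (d : Int)) - 1 ∧
            ¬ ((pre.length : Int) + 1 < PySem.Str.len text ∧
               PySem.Str.pyGet? text ((pre.length : Int) + 1) = some '\n')) := by
          rw [hd]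
          rintro ⟨h1, h2⟩
          exact hcond ⟨by exact_mod_cast h1, fun hh => h2 (hnext.mpr hh)⟩
        rw [if_neg hneg]
        rw [show acc ++ pvGo ('\n'::rest) d = (acc ++ ['\n']) ++ pvGo rest 0 by
          simp [pvGo, hcond]]
        have hih := ih (pre ++ ['\n']) (acc ++ ['\n']) 0 (by simp [h])
        simp only [List.length_append, List.length_cons, List.length_nil] at hih
        convert hih using 3
        refine Prod.ext (by simp) (by push_cast; ring)
    · rw [pvStepA_ch _ _ _ _ hc]
      rw [show acc ++ pvGo (c::rest) d = (acc ++ [c]) ++ pvGo rest (d + 1) by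
        simp [pvGo, hc]]
      have hih := ih (pre ++ [c]) (acc ++ [c]) (d + 1) (by simp [h])
      simp only [List.length_append, List.length_cons, List.length_nil] at hih
      convert hih using 3
      refine Prod.ext (by simp) (by push_cast; ring)

lemma pv_A_eq (text : String) : mark_newlines_py text = String.ofList (pvGo text.toList 0) := by
  unfold mark_newlines_py
  by_cases h : text.toList = []
  · simp [h, pvGo]
  · rw [if_neg h]
    exact congrArg String.ofList (pv_A_loop text text.toList [] [] 0 (by simp))

lemma pv_go_split (l : List Char) : ∀ (fuel : Nat) (cur : List Char) (acc : List (List Char)),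
    l.length ≤ fuel →
    PySem.Chars.splitOn.go ['\n'] fuel l cur acc
      = acc.reverse ++ (List.splitOnP (· == '\n') l).modifyHead (cur.reverse ++ ·) := by
  induction l with
  | nil =>
    intro fuel cur acc _
    cases fuel <;> simp [PySem.Chars.splitOn.go, List.splitOnP_nil]
  | cons c rest ih =>
    intro fuel cur acc hf
    cases fuel with
    | zero => simp at hf
    | succ fuel =>
      rw [List.splitOnP_cons]
      by_cases hc : c = '\n'
      · subst hc
        simp only [PySem.Chars.splitOn.go, List.isPrefixOf]
        rw [if_pos (by simp)]
        simp only [List.length_cons, List.length_nil, List.drop_succ_cons, List.drop_zero]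
        rw [ih fuel [] ((cur.reverse) :: acc) (by simpa using Nat.le_of_succ_le_succ hf)]
        obtain ⟨p, ps, hps⟩ := List.exists_cons_of_ne_nil (List.splitOnP_ne_nil (· == '\n') rest)
        simp [hps]
      · simp only [PySem.Chars.splitOn.go]
        rw [if_neg (by simp [List.isPrefixOf]; intro hh; exact hc hh.symm)]
        rw [ih fuel (c :: cur) acc (by simpa using Nat.le_of_succ_le_succ hf)]
        obtain ⟨p, ps, hps⟩ := List.exists_cons_of_ne_nil (List.splitOnP_ne_nil (· == '\n') rest)
        simp [hps, hc]

lemma pv_splitOn_eq (cs : List Char) :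
    PySem.Chars.splitOn cs ['\n'] = List.splitOnP (· == '\n') cs := by
  rw [show PySem.Chars.splitOn cs ['\n'] = PySem.Chars.splitOn.go ['\n'] (cs.length + 1) cs [] [] from rfl]
  rw [pv_go_split cs (cs.length + 1) [] [] (Nat.le_succ _)]
  obtain ⟨p, ps, hps⟩ := List.exists_cons_of_ne_nil (List.splitOnP_ne_nil (· == '\n') cs)
  simp [hps]

lemma pv_head_split (rest p' : List Char) (ps' : List (List Char))
    (h : List.splitOnP (· == '\n') rest = p' :: ps') :
    (rest.head? = some '\n') ↔ (p' = [] ∧ ps' ≠ []) := by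
  cases rest with
  | nil =>
    rw [List.splitOnP_nil] at h
    cases h
    simp
  | cons a r =>
    rw [List.splitOnP_cons] at h
    by_cases ha : a = '\n'
    · subst ha
      rw [if_pos (by simp)] at h
      cases h
      simp [List.splitOnP_ne_nil]
    · rw [if_neg (by simpa using ha)] at h
      obtain ⟨q, qs, hq⟩ := List.exists_cons_of_ne_nil (List.splitOnP_ne_nil (· == '\n') r)
      rw [hq] at h
      simp only [List.modifyHead_cons] at h
      cases h
      simp [ha]

lemma pv_nil_split (rest p' : List Char) (ps' : List (List Char))
    (h : List.splitOnP (· == '\n') rest = p' :: ps') :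
    (rest = []) ↔ (p' = [] ∧ ps' = []) := by
  cases rest with
  | nil =>
    rw [List.splitOnP_nil] at h
    cases h
    simp
  | cons a r =>
    rw [List.splitOnP_cons] at h
    by_cases ha : a = '\n'
    · subst ha
      rw [if_pos (by simp)] at h
      cases h
      simp [List.splitOnP_ne_nil]
    · rw [if_neg (by simpa using ha)] at h
      obtain ⟨q, qs, hq⟩ := List.exists_cons_of_ne_nil (List.splitOnP_ne_nil (· == '\n') r)
      rw [hq] at h
      simp only [List.modifyHead_cons] at h
      cases h
      simp

-- Source B's loop over zip(parts, parts[1:]) as a recursion on the tail of parts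
def pvGlueB : List Char → List (List Char) → List Char
  | _, [] => []
  | prev, nxt :: rest =>
      (if 10 ≤ prev.length ∧ nxt ≠ [] then '|' else '\n') :: (nxt ++ pvGlueB nxt rest)

lemma pv_fold_glue : ∀ (ps : List (List Char)) (p acc : List Char),
    (((p :: ps).zip ps).foldl
      (fun (acc : List Char) (pr : List Char × List Char) =>
        acc ++ (if 10 ≤ pr.1.length ∧ pr.2 ≠ [] then '|' else '\n') :: pr.2) acc)
      = acc ++ pvGlueB p ps := by
  intro ps
  induction ps with
  | nil => intro p acc; simp [pvGlueB]
  | cons nxt rest ih =>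
    intro p acc
    rw [List.zip_cons_cons, List.foldl_cons, ih nxt]
    simp [pvGlueB]

lemma pv_B_key : ∀ (cs prev p : List Char) (ps : List (List Char)),
    List.splitOnP (· == '\n') cs = p :: ps →
    p ++ pvGlueB (prev ++ p) ps = pvGoB cs prev.length := by
  intro cs
  induction cs with
  | nil =>
    intro prev p ps h
    rw [List.splitOnP_nil] at h
    cases h
    simp [pvGlueB, pvGoB]
  | cons c rest ih =>
    intro prev p ps h
    rw [List.splitOnP_cons] at h
    by_cases hc : c = '\n'
    · subst hc
      rw [if_pos (by simp)] at h
      obtain ⟨p', ps', hps⟩ := List.exists_cons_of_ne_nil (List.splitOnP_ne_nil (· == '\n') rest)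
      rw [hps] at h
      cases h
      have hhead := pv_head_split rest p' ps' hps
      have hnil := pv_nil_split rest p' ps' hps
      have hih := ih [] p' ps' hps
      simp only [List.nil_append, List.length_nil] at hih
      simp only [pvGoB, List.nil_append, pvGlueB, List.append_nil]
      rw [hih]
      congr 1
      refine if_congr ?_ rfl rfl
      constructor
      · rintro ⟨h1, h2⟩
        exact ⟨h1, fun hh => h2 (hhead.mp hh).1, fun hh => h2 (hnil.mp hh).1⟩
      · rintro ⟨h1, h2, h3⟩
        refine ⟨h1, fun hp => ?_⟩
        by_cases hq : ps' = []
        · exact h3 (hnil.mpr ⟨hp, hq⟩)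
        · exact h2 (hhead.mpr ⟨hp, hq⟩)
    · rw [if_neg (by simpa using hc)] at h
      obtain ⟨q, qs, hq⟩ := List.exists_cons_of_ne_nil (List.splitOnP_ne_nil (· == '\n') rest)
      rw [hq] at h
      simp only [List.modifyHead_cons] at h
      injection h with h1 h2
      subst h1; subst h2
      have hih := ih (prev ++ [c]) q qs hq
      simp only [List.length_append, List.length_cons, List.length_nil] at hih
      simp only [pvGoB, if_neg hc, List.cons_append]
      rw [show prev ++ c :: q = (prev ++ [c]) ++ q by simp]
      rw [hih]

lemma pv_B_eq (text : String) : mark_newlines_py_alt text = String.ofList (pvGoB text.toList 0) := by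
  unfold mark_newlines_py_alt
  rw [pv_splitOn_eq]
  obtain ⟨p, ps, hps⟩ :=
    List.exists_cons_of_ne_nil (List.splitOnP_ne_nil (· == '\n') text.toList)
  rw [hps]
  simp only [List.drop_succ_cons, List.drop_zero, List.headD_cons]
  rw [pv_fold_glue]
  exact congrArg String.ofList (by simpa using pv_B_key text.toList [] p ps hps)

-- the two recursions agree exactly where pvBad is false
lemma pv_eq_iff : ∀ (cs : List Char) (d : Nat), (pvGo cs d = pvGoB cs d) ↔ pvBad cs d = false := by
  intro cs
  induction cs with
  | nil => intro d; simp [pvGo, pvGoB, pvBad]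
  | cons c rest ih =>
    intro d
    by_cases hc : c = '\n'
    · subst hc
      cases rest with
      | nil =>
        by_cases hd : 10 ≤ d
        · simp [pvGo, pvGoB, pvBad, hd]
        · simp [pvGo, pvGoB, pvBad, hd]
      | cons r rs =>
        have hcond : (10 ≤ d ∧ (r :: rs).head? ≠ some '\n') ↔
            (10 ≤ d ∧ (r :: rs).head? ≠ some '\n' ∧ (r :: rs) ≠ []) := by simp
        have e1 : pvGo ('\n' :: r :: rs) d
            = (if 10 ≤ d ∧ (r :: rs).head? ≠ some '\n' then '|' else '\n') :: pvGo (r :: rs) 0 := by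
          show (if ('\n' = '\n') then _ else _) = _
          rw [if_pos rfl]
        have e2 : pvGoB ('\n' :: r :: rs) d
            = (if 10 ≤ d ∧ (r :: rs).head? ≠ some '\n' ∧ (r :: rs) ≠ [] then '|' else '\n')
              :: pvGoB (r :: rs) 0 := by
          show (if ('\n' = '\n') then _ else _) = _
          rw [if_pos rfl]
        have e3 : pvBad ('\n' :: r :: rs) d = pvBad (r :: rs) 0 := by
          show (if ('\n' = '\n') then _ else _) = _
          rw [if_pos rfl, if_neg (by simp : ¬ (r :: rs) = [])]
        rw [e1, e2, e3, if_congr hcond rfl rfl]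
        constructor
        · intro h
          injection h with h1 h2
          exact (ih 0).mp h2
        · intro h
          rw [(ih 0).mpr h]
    · have e1 : pvGo (c :: rest) d = c :: pvGo rest (d + 1) := by simp only [pvGo, if_neg hc]
      have e2 : pvGoB (c :: rest) d = c :: pvGoB rest (d + 1) := by simp only [pvGoB, if_neg hc]
      have e3 : pvBad (c :: rest) d = pvBad rest (d + 1) := by simp only [pvBad, if_neg hc]
      rw [e1, e2, e3]
      constructor
      · intro h
        injection h with h1 h2
        exact (ih (d + 1)).mp h2
      · intro h
        rw [(ih (d + 1)).mpr h]

-- the recursions DIFFER everywhere pvBad holds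
lemma pv_ne_of_bad (cs : List Char) (d : Nat) (hb : pvBad cs d = true) :
    pvGo cs d ≠ pvGoB cs d := by
  intro h
  rw [(pv_eq_iff cs d).mp h] at hb
  simp at hb

-- pvBad at d = 0 is exactly the closed-form condition D_
lemma pvBad_iff : ∀ (cs : List Char) (d : Nat),
    pvBad cs d = true ↔
      (cs.getLast? = some '\n' ∧
        10 ≤ (cs.dropLast.reverse.takeWhile (fun c => c != '\n')).length +
          (if '\n' ∈ cs.dropLast then 0 else d)) := by
  intro cs
  induction cs with
  | nil => intro d; simp [pvBad]
  | cons c rest ih =>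
    intro d
    cases rest with
    | nil =>
      by_cases hc : c = '\n'
      · subst hc; simp [pvBad]
      · simp [pvBad, hc]
    | cons r rs =>
      have hrev : (c :: (r :: rs).dropLast).reverse = (r :: rs).dropLast.reverse ++ [c] := by
        simp
      have hdl : (c :: r :: rs).dropLast = c :: (r :: rs).dropLast := rfl
      have hlast : (c :: r :: rs).getLast? = (r :: rs).getLast? := List.getLast?_cons_cons
      have estep : ∀ (d : Nat), pvBad (c :: r :: rs) d
          = pvBad (r :: rs) (if c = '\n' then 0 else d + 1) := by
        intro d
        show (if c = '\n' then _ else _) = _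
        by_cases hc : c = '\n'
        · rw [if_pos hc, if_pos hc, if_neg (by simp : ¬ (r :: rs) = [])]
        · rw [if_neg hc, if_neg hc]
      by_cases hmem : '\n' ∈ (r :: rs).dropLast
      · -- takeWhile stops inside the old part; the counter is irrelevant
        have hall : ((r :: rs).dropLast.reverse.takeWhile (fun c => c != '\n')).length ≠
            (r :: rs).dropLast.reverse.length := by
          intro hlen
          have hself : (r :: rs).dropLast.reverse.takeWhile (fun c => c != '\n')
              = (r :: rs).dropLast.reverse :=
            (List.takeWhile_prefix _).eq_of_length hlen
          have h2 := List.takeWhile_eq_self_iff.mp hself '\n' (by simpa using hmem)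
          simp at h2
        have htw : ((c :: r :: rs).dropLast.reverse.takeWhile (fun c => c != '\n'))
            = ((r :: rs).dropLast.reverse.takeWhile (fun c => c != '\n')) := by
          rw [hdl, hrev, List.takeWhile_append, if_neg hall]
        have hmem' : '\n' ∈ (c :: r :: rs).dropLast := by
          rw [hdl]; exact List.mem_cons_of_mem _ hmem
        rw [estep, ih, hlast, htw]
        simp [hmem]

      · -- no newline in the old part: takeWhile takes it all
        have hall : ((r :: rs).dropLast.reverse.takeWhile (fun c => c != '\n')).length =
            (r :: rs).dropLast.reverse.length := by
          have : (r :: rs).dropLast.reverse.takeWhile (fun c => c != '\n')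
              = (r :: rs).dropLast.reverse := by
            rw [List.takeWhile_eq_self_iff]
            intro x hx
            have hxm : x ∈ (r :: rs).dropLast := by simpa using hx
            simp only [bne_iff_ne, ne_eq]
            exact fun hxe => hmem (hxe ▸ hxm)
          rw [this]
        have hfull : (r :: rs).dropLast.reverse.takeWhile (fun c => c != '\n')
            = (r :: rs).dropLast.reverse :=
          (List.takeWhile_prefix _).eq_of_length hall
        by_cases hc : c = '\n'
        · subst hc
          have hmem' : '\n' ∈ ('\n' :: r :: rs).dropLast := by rw [hdl]; simp
          have htw : (('\n' :: r :: rs).dropLast.reverse.takeWhile (fun c => c != '\n'))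
              = (r :: rs).dropLast.reverse := by
            rw [hdl, hrev, List.takeWhile_append, if_pos hall]
            rw [List.takeWhile_cons_of_neg (by simp), List.append_nil]
          rw [estep, ih, hlast, if_pos rfl, htw]
          simp [hmem, hall]
        · have hmem' : ¬ '\n' ∈ (c :: r :: rs).dropLast := by
            rw [hdl]
            simp only [List.mem_cons, not_or]
            exact ⟨fun hcc => hc hcc.symm, hmem⟩
          have htw : ((c :: r :: rs).dropLast.reverse.takeWhile (fun c => c != '\n'))
              = (r :: rs).dropLast.reverse ++ [c] := by
            rw [hdl, hrev, List.takeWhile_append, if_pos hall]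
            rw [List.takeWhile_cons_of_pos (by simpa using hc), List.takeWhile_nil]
          rw [estep, ih, hlast, if_neg hc, htw]
          simp only [if_neg hmem, if_neg hmem', hall, List.length_append,
            List.length_reverse, List.length_cons, List.length_nil]
          constructor
          · rintro ⟨h1, h2⟩; exact ⟨h1, by omega⟩
          · rintro ⟨h1, h2⟩; exact ⟨h1, by omega⟩

lemma pv_D_iff (text : String) : D_mark_newlines_py text ↔ pvBad text.toList 0 = true := by
  rw [pvBad_iff text.toList 0]
  unfold D_mark_newlines_py
  constructor
  · rintro ⟨h1, h2⟩; exact ⟨h1, by split_ifs <;> omega⟩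
  · rintro ⟨h1, h2⟩; refine ⟨h1, ?_⟩; split_ifs at h2 <;> omega

lemma pv_ofList_inj (a b : List Char) (h : String.ofList a = String.ofList b) : a = b := by
  have := congrArg String.toList h
  simpa using this

-- ===== VERDICT (by name: the statement is the Claim_ definition above) =====
theorem mark_newlines_py_spec : Claim_unchanged_mark_newlines_py := by
  intro text _
  unfold Spec_mark_newlines_py
  intro hnd
  rw [pv_A_eq, pv_B_eq]
  have hb : pvBad text.toList 0 = false := by
    rcases Bool.eq_false_or_eq_true (pvBad text.toList 0) with h | h
    · exact absurd ((pv_D_iff text).mpr h) hnd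
    · exact h
  rw [(pv_eq_iff text.toList 0).mpr hb]

theorem mark_newlines_py_changed : Claim_changed_mark_newlines_py := by
  unfold Claim_changed_mark_newlines_py; decide

theorem mark_newlines_py_tight : Claim_exact_mark_newlines_py := by
  intro text _ hd heq
  rw [pv_A_eq, pv_B_eq] at heq
  exact pv_ne_of_bad text.toList 0 ((pv_D_iff text).mp hd) (pv_ofList_inj _ _ heq)
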